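-- pv_equiv track=rewrite | github.com/arun-royalbrothers/Python-Education | interview_programs.py | greedyFox
-- ===== SOURCE A (Python) =====
-- def greedyFox(arr):
--     max_s = arr[0]
--     cur_s = arr[0]
--     for i in range(1, len(arr)):
--         if arr[i] > arr[i-1]:
--             cur_s+=arr[i]
--             if cur_s > max_s:
--                 max_s = cur_s
--         else:
--             cur_s = arr[i]
--     return max_s
-- ===== SOURCE B (Python) =====
-- def greedyFox(arr):
--     # prefix-sum table: pref[j] = sum of arr[:j]
--     pref = [0]
--     for x in arr:
--         pref.append(pref[-1] + x)
--     # candidates: arr[0] plus, for every index i that extends an increasing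
--     # run, the sum of that run from its start up to i
--     cands = [arr[0]]
--     start = 0
--     for i in range(1, len(arr)):
--         if arr[i] > arr[i - 1]:
--             cands.append(pref[i + 1] - pref[start])
--         else:
--             start = i
--     return max(cands)
-- ===== Notes on version B (the rewrite author's own statement) =====
-- stated objective: alternative
-- what changed: B precomputes a prefix-sum table and tracks the current run's start index, collecting each increasing-step run-prefix sum into a candidate list and taking max() at the end, instead of A's single pass with a running sum and inline running maximum.
import Mathlib
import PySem

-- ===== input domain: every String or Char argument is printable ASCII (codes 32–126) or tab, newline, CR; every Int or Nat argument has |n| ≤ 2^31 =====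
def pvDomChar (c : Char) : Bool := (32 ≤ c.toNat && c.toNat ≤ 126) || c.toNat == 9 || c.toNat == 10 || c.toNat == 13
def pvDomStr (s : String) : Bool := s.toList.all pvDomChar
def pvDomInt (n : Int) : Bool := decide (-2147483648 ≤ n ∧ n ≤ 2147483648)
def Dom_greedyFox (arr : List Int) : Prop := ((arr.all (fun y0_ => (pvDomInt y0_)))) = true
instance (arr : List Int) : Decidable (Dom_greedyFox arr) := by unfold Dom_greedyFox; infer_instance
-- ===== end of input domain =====

-- B trades A's inline running maximum for a prefix-sum table + run-start index + candidate list
-- reduced by max() at the end: a different decomposition of the same O(n) task, not claimed faster.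
-- ===== PORT A =====
def greedyFox (arr : List Int) : Int :=
  match arr with
  | [] => 0  -- unreachable under Pre_greedyFox (Python raises IndexError on [])
  | a0 :: _ =>
    let st := (PySem.List.pyRange 1 (arr.length : Int) 1).foldl
      (fun (s : Int × Int) i =>
        if PySem.List.pyGetD arr i 0 > PySem.List.pyGetD arr (i - 1) 0 then
          let cur := s.2 + PySem.List.pyGetD arr i 0
          (if cur > s.1 then cur else s.1, cur)
        else
          (s.1, PySem.List.pyGetD arr i 0)) (a0, a0)
    st.1

-- ===== PORT B =====
def greedyFox_alt (arr : List Int) : Int :=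
  match arr with
  | [] => 0  -- unreachable under Pre_greedyFox (Python raises IndexError on [])
  | a0 :: _ =>
    let pref := arr.foldl (fun P x => P ++ [PySem.List.pyGetD P (-1) 0 + x]) [(0 : Int)]
    let st := (PySem.List.pyRange 1 (arr.length : Int) 1).foldl
      (fun (s : List Int × Int) i =>
        if PySem.List.pyGetD arr i 0 > PySem.List.pyGetD arr (i - 1) 0 then
          (s.1 ++ [PySem.List.pyGetD pref (i + 1) 0 - PySem.List.pyGetD pref s.2 0], s.2)
        else
          (s.1, i)) ([a0], 0)
    (PySem.List.max? st.1 (fun y => y)).getD 0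

-- ===== PRECONDITION & SPEC =====
-- Pre_ excludes only the empty list, on which A raises IndexError (arr[0]).
def Pre_greedyFox (arr : List Int) : Prop := arr ≠ []
instance (arr : List Int) : Decidable (Pre_greedyFox arr) := by unfold Pre_greedyFox; infer_instance
def pvWitness_greedyFox : List Int := [1, -2, 3]

def Spec_greedyFox (arr : List Int) (out : Int) : Prop := out = greedyFox_alt arr
instance (arr : List Int) (out : Int) : Decidable (Spec_greedyFox arr out) := by unfold Spec_greedyFox; infer_instance

-- ===== CLAIM (what is proved, stated in full; the proofs are below) =====
def Claim_equal_greedyFox : Prop := ∀ (arr : List Int), Dom_greedyFox arr → Pre_greedyFox arr → Spec_greedyFox arr (greedyFox arr)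

-- ===== LEMMAS AND PROOFS =====

-- sum of the first j elements
def psum (arr : List Int) (j : Nat) : Int := (arr.take j).sum

-- the tail of the prefix-sum table built from seed s over l
def scanAdd (s : Int) : List Int → List Int
  | [] => []
  | x :: t => (s + x) :: scanAdd (s + x) t

lemma pref_aux (l : List Int) : ∀ (P : List Int) (x0 : Int), P.getLast? = some x0 →
    l.foldl (fun P x => P ++ [PySem.List.pyGetD P (-1) 0 + x]) P = P ++ scanAdd x0 l := by
  induction l with
  | nil => intro P x0 h; simp [scanAdd]
  | cons x t ih =>
    intro P x0 h
    have hP : P ≠ [] := by intro hn; simp [hn] at h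
    have hlast : PySem.List.pyGetD P (-1) 0 = x0 := by
      rw [PySem.List.pyGetD_neg_one P 0 hP]
      have h2 : P.getLast? = some (P.getLast hP) := List.getLast?_eq_getLast hP
      rw [h2] at h
      exact Option.some.inj h
    simp only [List.foldl_cons, hlast]
    rw [ih (P ++ [x0 + x]) (x0 + x) (by simp)]
    simp [scanAdd]

lemma scanAdd_getD (l : List Int) : ∀ (s : Int) (k : Nat), k < l.length →
    (scanAdd s l).getD k 0 = s + psum l (k + 1) := by
  induction l with
  | nil => intro s k h; simp at h
  | cons x t ih =>
    intro s k h
    cases k with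
    | zero => simp [scanAdd, psum]
    | succ k =>
      simp only [scanAdd, List.getD_cons_succ]
      rw [ih (s + x) k (by simpa using h)]
      simp [psum, List.take_succ_cons]
      ring

lemma psum_succ (arr : List Int) (j : Nat) (h : j < arr.length) :
    psum arr (j + 1) = psum arr j + arr.getD j 0 := by
  simp [psum, List.sum_take_succ _ _ h, List.getD, List.getElem?_eq_getElem h]

-- prefix table lookup: pref = 0 :: scanAdd 0 arr, indexed at a Nat j ≤ arr.length
lemma pref_getD (arr : List Int) (j : Nat) (h : j ≤ arr.length) :
    ((0 : Int) :: scanAdd 0 arr).getD j 0 = psum arr j := by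
  cases j with
  | zero => simp [psum]
  | succ j =>
    simp only [List.getD_cons_succ]
    rw [scanAdd_getD arr 0 j (by omega)]
    simp

-- the main loop invariant: A's fold state vs B's fold state, from position j on
lemma loop_inv (arr : List Int) (pref : List Int)
    (hpref : ∀ (k : Nat), k ≤ arr.length → pref.getD k 0 = psum arr k) :
    ∀ (d j : Nat) (h : Int) (t : List Int) (start : Nat),
    j + d = arr.length → 1 ≤ j → start < j →
    ∃ (t2 : List Int) (c2 s2 : Int),
      (PySem.List.pyRange (j : Int) (arr.length : Int) 1).foldl
        (fun (s : List Int × Int) i =>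
          if PySem.List.pyGetD arr i 0 > PySem.List.pyGetD arr (i - 1) 0 then
            (s.1 ++ [PySem.List.pyGetD pref (i + 1) 0 - PySem.List.pyGetD pref s.2 0], s.2)
          else
            (s.1, i)) (h :: t, (start : Int)) = (h :: t2, s2) ∧
      (PySem.List.pyRange (j : Int) (arr.length : Int) 1).foldl
        (fun (s : Int × Int) i =>
          if PySem.List.pyGetD arr i 0 > PySem.List.pyGetD arr (i - 1) 0 then
            let cur := s.2 + PySem.List.pyGetD arr i 0
            (if cur > s.1 then cur else s.1, cur)
          else
            (s.1, PySem.List.pyGetD arr i 0)) (t.foldl max h, psum arr j - psum arr start)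
        = (t2.foldl max h, c2) := by
  intro d
  induction d with
  | zero =>
    intro j h t start hjd hj hs
    have hr : PySem.List.pyRange (j : Int) (arr.length : Int) 1 = [] :=
      PySem.List.pyRange_one_eq_nil (by omega)
    rw [hr]
    exact ⟨t, psum arr j - psum arr start, (start : Int), by simp, by simp⟩
  | succ d ih =>
    intro j h t start hjd hj hs
    have hjlt : j < arr.length := by omega
    have hr : PySem.List.pyRange (j : Int) (arr.length : Int) 1
        = (j : Int) :: PySem.List.pyRange ((j : Int) + 1) (arr.length : Int) 1 :=
      PySem.List.pyRange_one_cons (by exact_mod_cast hjlt)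
    rw [hr]
    simp only [List.foldl_cons]
    have hgj : PySem.List.pyGetD arr (j : Int) 0 = arr.getD j 0 := by
      simp [PySem.List.pyGetD_natCast]
    have hgj1 : PySem.List.pyGetD arr ((j : Int) - 1) 0 = arr.getD (j - 1) 0 := by
      have : (j : Int) - 1 = ((j - 1 : Nat) : Int) := by omega
      rw [this]; simp [PySem.List.pyGetD_natCast]
    have hpj1 : PySem.List.pyGetD pref ((j : Int) + 1) 0 = psum arr (j + 1) := by
      have : (j : Int) + 1 = ((j + 1 : Nat) : Int) := by omega
      rw [this]; simp only [PySem.List.pyGetD_natCast]; exact hpref (j + 1) (by omega)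
    have hpst : PySem.List.pyGetD pref (start : Int) 0 = psum arr start := by
      simp only [PySem.List.pyGetD_natCast]; exact hpref start (by omega)
    rw [hgj, hgj1, hpj1, hpst]
    by_cases hc : arr.getD j 0 > arr.getD (j - 1) 0
    · simp only [hc, if_pos, gt_iff_lt]
      -- increasing step: B appends cur = psum (j+1) - psum start, A sets cur_s := cur
      have hcur : psum arr j - psum arr start + arr.getD j 0 = psum arr (j + 1) - psum arr start := by
        rw [psum_succ arr j hjlt]; ring
      have hj1 : ((j : Int) + 1) = ((j + 1 : Nat) : Int) := by omega
      obtain ⟨t2, c2, s2, hB, hA⟩ :=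
        ih (j + 1) h (t ++ [psum arr (j + 1) - psum arr start]) start (by omega) (by omega) (by omega)
      refine ⟨t2, c2, s2, ?_, ?_⟩
      · rw [← hB, hj1]; rfl
      · rw [← hA, hj1]
        have hmax : (if psum arr j - psum arr start + arr.getD j 0 > t.foldl max h then
              psum arr j - psum arr start + arr.getD j 0 else t.foldl max h)
            = (t ++ [psum arr (j + 1) - psum arr start]).foldl max h := by
          rw [List.foldl_append]
          simp only [List.foldl_cons, List.foldl_nil, hcur]
          split_ifs <;> omega
        rw [hmax, hcur]
    · simp only [hc, if_false]
      -- reset step: B records start := j, A sets cur_s := arr[j] = psum (j+1) - psum j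
      have hcur : arr.getD j 0 = psum arr (j + 1) - psum arr j := by
        rw [psum_succ arr j hjlt]; ring
      have hj1 : ((j : Int) + 1) = ((j + 1 : Nat) : Int) := by omega
      obtain ⟨t2, c2, s2, hB, hA⟩ := ih (j + 1) h t j (by omega) (by omega) (by omega)
      refine ⟨t2, c2, s2, ?_, ?_⟩
      · rw [← hB, hj1]
      · rw [← hA, hj1, hcur]

-- ===== VERDICT (by name: the statement is the Claim_ definition above) =====
theorem greedyFox_spec : Claim_equal_greedyFox := by
  intro arr _ hpre
  unfold Spec_greedyFox greedyFox greedyFox_alt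
  match arr, hpre with
  | a0 :: rest, _ =>
    simp only
    have hpref : (a0 :: rest).foldl (fun P x => P ++ [PySem.List.pyGetD P (-1) 0 + x]) [(0 : Int)]
        = (0 : Int) :: scanAdd 0 (a0 :: rest) := by
      rw [pref_aux (a0 :: rest) [(0 : Int)] 0 (by simp)]; rfl
    rw [hpref]
    obtain ⟨t2, c2, s2, hB, hA⟩ :=
      loop_inv (a0 :: rest) ((0 : Int) :: scanAdd 0 (a0 :: rest))
        (fun k hk => pref_getD (a0 :: rest) k hk)
        rest.length 1 a0 [] 0 (by simp; omega) (by omega) (by omega)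
    have h1 : ((1 : Nat) : Int) = (1 : Int) := by norm_num
    have hps : psum (a0 :: rest) 1 - psum (a0 :: rest) 0 = a0 := by simp [psum]
    rw [h1] at hB hA
    rw [hps] at hA
    have hA' : ((PySem.List.pyRange 1 ((a0 :: rest).length : Int) 1).foldl
        (fun (s : Int × Int) i =>
          if PySem.List.pyGetD (a0 :: rest) i 0 > PySem.List.pyGetD (a0 :: rest) (i - 1) 0 then
            let cur := s.2 + PySem.List.pyGetD (a0 :: rest) i 0
            (if cur > s.1 then cur else s.1, cur)
          else
            (s.1, PySem.List.pyGetD (a0 :: rest) i 0)) (a0, a0)) = (t2.foldl max a0, c2) := by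
      simpa using hA
    have hB' : ((PySem.List.pyRange 1 ((a0 :: rest).length : Int) 1).foldl
        (fun (s : List Int × Int) i =>
          if PySem.List.pyGetD (a0 :: rest) i 0 > PySem.List.pyGetD (a0 :: rest) (i - 1) 0 then
            (s.1 ++ [PySem.List.pyGetD ((0 : Int) :: scanAdd 0 (a0 :: rest)) (i + 1) 0
              - PySem.List.pyGetD ((0 : Int) :: scanAdd 0 (a0 :: rest)) s.2 0], s.2)
          else
            (s.1, i)) ([a0], 0)) = (a0 :: t2, s2) := by
      simpa using hB
    rw [hA', hB']
    rw [PySem.List.max?_id_cons]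
    rfl
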